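-- pv_equiv track=rewrite | github.com/kalyanenggAI-pixel/oracle-fusion-procurement-agent | tools/fusion_lookup.py | _meaningful_words
-- ===== SOURCE A (Python) =====
-- STOP_WORDS = {"and", "the", "for", "with", "from", "a", "an", "of"}
--
-- def _meaningful_words(item_description: str) -> list[str]:
--     """Return the first meaningful words from an item description."""
--
--     words = [
--         word.strip(",.()[]{}").lower()
--         for word in item_description.split()
--         if word.strip(",.()[]{}")
--     ]
--     filtered = [word for word in words if word not in STOP_WORDS and len(word) > 1]
--     return filtered[:2]
-- ===== SOURCE B (Python) =====
-- STOP_WORDS = {"and", "the", "for", "with", "from", "a", "an", "of"}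
--
-- _STRIP = ",.()[]{}"
--
-- def _meaningful_words(item_description: str) -> list[str]:
--     """Return the first meaningful words from an item description."""
--     found = []
--     core = []      # lowered chars of the current token, ends already stripped
--     pending = []   # run of strip-chars seen after the first kept char
--     for ch in item_description:
--         if ch.isspace():
--             word = "".join(core)
--             if word not in STOP_WORDS and len(word) > 1:
--                 found.append(word)
--                 if len(found) == 2:
--                     return found
--             core = []
--             pending = []
--         elif ch in _STRIP:
--             if core:
--                 pending.append(ch)
--         else:
--             core += pending
--             pending = []
--             core.append(ch.lower())
--     word = "".join(core)
--     if word not in STOP_WORDS and len(word) > 1: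
--         found.append(word)
--     return found
-- ===== Notes on version B (the rewrite author's own statement) =====
-- stated objective: alternative
-- what changed: Replaced A's split()/strip()/lower() comprehension pipeline plus slice by a single character-level state machine that tokenizes the string itself, strips punctuation and lowercases incrementally (core/pending buffers), and returns as soon as two meaningful words are found.
import Mathlib
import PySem

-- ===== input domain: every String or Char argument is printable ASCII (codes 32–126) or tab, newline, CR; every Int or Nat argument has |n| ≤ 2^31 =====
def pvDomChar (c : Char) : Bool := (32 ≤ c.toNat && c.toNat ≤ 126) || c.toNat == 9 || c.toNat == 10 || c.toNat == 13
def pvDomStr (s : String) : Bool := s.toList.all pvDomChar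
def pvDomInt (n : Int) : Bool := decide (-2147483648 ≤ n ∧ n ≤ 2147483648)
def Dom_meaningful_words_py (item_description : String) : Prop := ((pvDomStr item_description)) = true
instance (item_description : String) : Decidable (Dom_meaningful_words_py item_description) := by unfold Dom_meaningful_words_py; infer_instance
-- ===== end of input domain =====

-- B replaces A's split + strip/lower comprehensions + slice pipeline by a single
-- character-level state machine that tokenizes, strips and lowers incrementally and
-- returns as soon as two meaningful words are found (objective: alternative).

-- ===== PORT A =====
def STOP_WORDS : List String :=
  PySem.Set.ofList ["and", "the", "for", "with", "from", "a", "an", "of"]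

def meaningful_words_py (item_description : String) : List String :=
  let words :=
    ((PySem.Str.split₀ item_description).filter
        (fun word => PySem.Str.stripChars word ",.()[]{}" ≠ "")).map
      (fun word => PySem.Str.lower (PySem.Str.stripChars word ",.()[]{}"))
  let filtered :=
    words.filter (fun word => !STOP_WORDS.contains word && 1 < PySem.Str.len word)
  PySem.List.slice filtered none (some 2)

-- ===== PORT B =====
def mwStrip : List Char := ",.()[]{}".toList

-- the state machine of Source B: found = words emitted, core = stripped+lowered chars of
-- the current token, pending = run of strip-chars seen after the first kept char
def mwScan : List Char → List String → List Char → List Char → List String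
  | [], found, core, _pending =>
    let word := String.ofList core
    if !STOP_WORDS.contains word && 1 < PySem.Str.len word then found ++ [word] else found
  | ch :: rest, found, core, pending =>
    if PySem.Chars.isspace ch then
      let word := String.ofList core
      if !STOP_WORDS.contains word && 1 < PySem.Str.len word then
        let found' := found ++ [word]
        if found'.length == 2 then found' else mwScan rest found' [] []
      else mwScan rest found [] []
    else if mwStrip.contains ch then
      mwScan rest found core (if core.isEmpty then pending else pending ++ [ch])
    else
      mwScan rest found (core ++ pending ++ [PySem.Chars.lowerChar ch]) []

def meaningful_words_py_alt (item_description : String) : List String :=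
  mwScan item_description.toList [] [] []

-- ===== PRECONDITION & SPEC =====
def Spec_meaningful_words_py (item_description : String) (out : List String) : Prop := out = meaningful_words_py_alt item_description
instance (item_description : String) (out : List String) : Decidable (Spec_meaningful_words_py item_description out) := by unfold Spec_meaningful_words_py; infer_instance

-- ===== CLAIM (what is proved, stated in full; the proofs are below) =====
def Claim_equal_meaningful_words_py : Prop := ∀ (item_description : String), Dom_meaningful_words_py item_description → Spec_meaningful_words_py item_description (meaningful_words_py item_description)

-- ===== LEMMAS AND PROOFS =====

-- spec-side abbreviations: the strip-char test, A's per-token normalisation, A's filter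
def mwP (c : Char) : Bool := mwStrip.contains c

def mwA (t : List Char) : List Char := PySem.Chars.lower (PySem.Chars.stripChars t mwStrip)

def mwPb (u : List Char) : Bool :=
  !STOP_WORDS.contains (String.ofList u) && decide (1 < (u.length : Int))

-- the invariant tying mwScan's (core, pending) to the raw current token cur.reverse:
-- after dropping the leading strip-run, the token so far is u ++ pending with u its
-- kept part (lowered into core, ending in a non-strip char) and pending a strip-run
def mwR (cur core pending : List Char) : Prop :=
  ∃ u, List.dropWhile mwP cur.reverse = u ++ pending ∧
    core = PySem.Chars.lower u ∧
    pending.all mwP = true ∧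
    (u = [] → pending = []) ∧
    (∀ h : u ≠ [], mwP (u.getLast h) = false)

theorem mwR_nil : mwR [] [] [] := ⟨[], by simp, rfl, rfl, by simp, by simp⟩

theorem mw_lowerChar_strip {c : Char} (h : mwP c = true) : PySem.Chars.lowerChar c = c := by
  have hm : c ∈ mwStrip := by simpa [mwP] using h
  have : mwStrip = [',', '.', '(', ')', '[', ']', '{', '}'] := by decide
  rw [this] at hm
  fin_cases hm <;> decide

theorem mw_lower_strips {v : List Char} (h : v.all mwP = true) : PySem.Chars.lower v = v := by
  induction v with
  | nil => rfl
  | cons c t ih =>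
    simp only [List.all_cons, Bool.and_eq_true] at h
    have ht : PySem.Chars.lower t = t := ih h.2
    simp only [PySem.Chars.lower] at ht ⊢
    simp [mw_lowerChar_strip h.1, ht]

theorem mw_lower_eq_nil_iff (u : List Char) : PySem.Chars.lower u = [] ↔ u = [] := by
  simp [PySem.Chars.lower]

-- stripChars of the raw token, computed from the invariant's decomposition
theorem mw_strip_of_R {raw u pending : List Char}
    (h : List.dropWhile mwP raw = u ++ pending) (hp : pending.all mwP = true)
    (hu0 : u = [] → pending = []) (hul : ∀ h : u ≠ [], mwP (u.getLast h) = false) :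
    PySem.Chars.stripChars raw mwStrip = u := by
  have hP : (fun c => mwStrip.contains c) = mwP := rfl
  simp only [PySem.Chars.stripChars, hP, h]
  rcases List.eq_nil_or_concat u with rfl | ⟨u', a, rfl⟩
  · simp [hu0 rfl]
  · have ha : mwP a = false := by
      have := hul (by simp)
      simpa [List.getLast_append] using this
    have hdrop : List.dropWhile mwP pending.reverse = [] := by
      rw [List.dropWhile_eq_nil_iff]
      intro x hx
      have := List.all_eq_true.mp hp x (List.mem_reverse.mp hx)
      simpa using this
    rw [List.reverse_append, List.dropWhile_append, hdrop]
    simp [List.reverse_append, ha]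

-- split₀.go accumulates finished tokens in acc (reversed)
theorem mw_go_acc (cs : List Char) : ∀ cur acc,
    PySem.Chars.split₀.go cs cur acc = acc.reverse ++ PySem.Chars.split₀.go cs cur [] := by
  induction cs with
  | nil =>
    intro cur acc
    by_cases h : cur.isEmpty <;> simp [PySem.Chars.split₀.go, h]
  | cons c rest ih =>
    intro cur acc
    by_cases hs : PySem.Chars.isspace c
    · by_cases hc : cur.isEmpty
      · simp only [PySem.Chars.split₀.go, hs, hc, if_true]
        exact ih [] acc
      · simp only [PySem.Chars.split₀.go, hs, hc, if_true, if_false, Bool.false_eq_true]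
        rw [ih [] (cur.reverse :: acc), ih [] [cur.reverse]]
        simp
    · simp only [PySem.Chars.split₀.go, hs, if_false, Bool.false_eq_true]
      exact ih (c :: cur) acc

-- the finish test of mwScan is mwPb of core
theorem mw_cond (u : List Char) :
    (!STOP_WORDS.contains (String.ofList u) && decide (1 < PySem.Str.len (String.ofList u))) = mwPb u := by
  simp [mwPb, PySem.Str.len]

-- main invariant lemma: the scanner computes A's filtered token stream, cut at 2
theorem mwScan_eq (cs : List Char) : ∀ found core pending cur,
    found.length < 2 → mwR cur core pending →
    mwScan cs found core pending =
      (found ++ (((PySem.Chars.split₀.go cs cur []).map mwA).filter mwPb).map String.ofList).take 2 := by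
  induction cs with
  | nil =>
    intro found core pending cur hf hR
    obtain ⟨u, hdrop, hcore, hp, hu0, hul⟩ := hR
    by_cases hc : cur.isEmpty
    · have hcur : cur = [] := by simpa using hc
      subst hcur
      simp only [List.reverse_nil, List.dropWhile_nil] at hdrop
      obtain ⟨hu, hpend⟩ := List.append_eq_nil_iff.mp hdrop.symm
      subst hu; subst hpend
      have hcore0 : core = [] := by simpa [PySem.Chars.lower] using hcore
      subst hcore0
      have hF : mwPb ([] : List Char) = false := by decide
      simp only [mwScan, mw_cond, hF, Bool.false_eq_true, if_false]
      simp [PySem.Chars.split₀.go, List.take_of_length_le (Nat.le_of_lt hf)]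
    · have hstripu := mw_strip_of_R hdrop hp hu0 hul
      have htok : mwA cur.reverse = core := by rw [mwA, hstripu, hcore]
      have hgo : PySem.Chars.split₀.go [] cur [] = [cur.reverse] := by
        simp [PySem.Chars.split₀.go, hc]
      simp only [mwScan, mw_cond, hgo, List.map_cons, List.map_nil, List.filter_cons,
        List.filter_nil, htok]
      by_cases hpb : mwPb core
      · simp only [hpb, if_true, List.map_cons, List.map_nil]
        rw [List.take_of_length_le (by simp; omega)]
      · simp only [hpb, Bool.false_eq_true, if_false, List.map_nil, List.append_nil]
        rw [List.take_of_length_le (Nat.le_of_lt hf)]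
  | cons c rest ih =>
    intro found core pending cur hf hR
    obtain ⟨u, hdrop, hcore, hp, hu0, hul⟩ := hR
    by_cases hs : PySem.Chars.isspace c
    · by_cases hc : cur.isEmpty
      · have hcur : cur = [] := by simpa using hc
        subst hcur
        simp only [List.reverse_nil, List.dropWhile_nil] at hdrop
        obtain ⟨hu, hpend⟩ := List.append_eq_nil_iff.mp hdrop.symm
        subst hu; subst hpend
        have hcore0 : core = [] := by simpa [PySem.Chars.lower] using hcore
        subst hcore0
        have hgo : PySem.Chars.split₀.go (c :: rest) [] [] = PySem.Chars.split₀.go rest [] [] := by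
          simp [PySem.Chars.split₀.go, hs]
        have hF : mwPb ([] : List Char) = false := by decide
        simp only [mwScan, mw_cond, hs, if_true, hF, Bool.false_eq_true, if_false, hgo]
        exact ih found [] [] [] hf mwR_nil
      · have hstripu := mw_strip_of_R hdrop hp hu0 hul
        have htok : mwA cur.reverse = core := by rw [mwA, hstripu, hcore]
        have hgo : PySem.Chars.split₀.go (c :: rest) cur [] =
            cur.reverse :: PySem.Chars.split₀.go rest [] [] := by
          have h1 : PySem.Chars.split₀.go (c :: rest) cur [] =
              PySem.Chars.split₀.go rest [] [cur.reverse] := by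
            simp [PySem.Chars.split₀.go, hs, hc]
          rw [h1, mw_go_acc rest [] [cur.reverse]]; simp
        simp only [mwScan, mw_cond, hs, if_true, hgo, List.map_cons, List.filter_cons, htok]
        by_cases hpb : mwPb core
        · simp only [hpb, if_true, List.map_cons, List.length_append, List.length_cons,
            List.length_nil]
          by_cases h2 : found.length + 1 = 2
          · have hb : (found.length + 0 + 1 == 2) = true := by simpa using h2
            simp only [hb, if_true]
            have hassoc : found ++ String.ofList core ::
                (((PySem.Chars.split₀.go rest [] []).map mwA).filter mwPb).map String.ofList
                = (found ++ [String.ofList core]) ++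
                  (((PySem.Chars.split₀.go rest [] []).map mwA).filter mwPb).map String.ofList := by
              simp
            rw [hassoc, List.take_left'
              (show (found ++ [String.ofList core]).length = 2 by simpa using h2)]
          · have hb : (found.length + 0 + 1 == 2) = false := by simpa using h2
            simp only [hb, Bool.false_eq_true, if_false]
            rw [ih (found ++ [String.ofList core]) [] [] []
              (by simp only [List.length_append, List.length_cons, List.length_nil]; omega) mwR_nil]
            simp
        · simp only [hpb, Bool.false_eq_true, if_false]
          exact ih found [] [] [] hf mwR_nil
    · have hs' : PySem.Chars.isspace c = false := by simpa using hs
      have hgo : PySem.Chars.split₀.go (c :: rest) cur [] =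
          PySem.Chars.split₀.go rest (c :: cur) [] := by
        simp [PySem.Chars.split₀.go, hs']
      simp only [mwScan, hs', Bool.false_eq_true, if_false, hgo]
      by_cases hstr : mwStrip.contains c
      · have hmc : mwP c = true := hstr
        simp only [hstr, if_true]
        rcases eq_or_ne u [] with rfl | hu
        · have hpend := hu0 rfl
          have hcore0 : core = [] := by simpa [PySem.Chars.lower] using hcore
          subst hpend; subst hcore0
          simp only [List.nil_append] at hdrop
          simp only [List.isEmpty_nil, if_true]
          refine ih found [] [] (c :: cur) hf ⟨[], ?_, rfl, rfl, fun _ => rfl, by simp⟩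
          simp [List.reverse_cons, List.dropWhile_append, hdrop, hmc]
        · have hcne : core.isEmpty = false := by
            rw [hcore]
            simp [mw_lower_eq_nil_iff, hu]
          simp only [hcne, Bool.false_eq_true, if_false]
          refine ih found core (pending ++ [c]) (c :: cur) hf
            ⟨u, ?_, hcore, ?_, fun h => absurd h hu, hul⟩
          · have hne : (u ++ pending).isEmpty = false := by
              simp [hu]
            simp [List.reverse_cons, List.dropWhile_append, hdrop, hne]
          · simp [List.all_append, hp, hmc]
      · have hmc : mwP c = false := by simpa [mwP] using hstr
        have hstr' : mwStrip.contains c = false := by simpa using hstr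
        simp only [hstr', Bool.false_eq_true, if_false]
        rcases eq_or_ne u [] with rfl | hu
        · have hpend := hu0 rfl
          have hcore0 : core = [] := by simpa [PySem.Chars.lower] using hcore
          subst hpend; subst hcore0
          simp only [List.nil_append] at hdrop
          refine ih found ([] ++ [] ++ [PySem.Chars.lowerChar c]) [] (c :: cur) hf
            ⟨[c], ?_, by simp [PySem.Chars.lower], rfl, fun _ => rfl, ?_⟩
          · simp [List.reverse_cons, List.dropWhile_append, hdrop, hmc]
          · intro h
            simpa using hmc
        · refine ih found (core ++ pending ++ [PySem.Chars.lowerChar c]) [] (c :: cur) hf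
            ⟨u ++ pending ++ [c], ?_, ?_, by simp, by simp, ?_⟩
          · have hne : (u ++ pending).isEmpty = false := by
              simp [hu]
            simp [List.reverse_cons, List.dropWhile_append, hdrop, hne]
          · have hpend' : List.map PySem.Chars.lowerChar pending = pending := by
              simpa [PySem.Chars.lower] using mw_lower_strips hp
            simp [hcore, PySem.Chars.lower, hpend']
          · intro h
            have hlast : (u ++ pending ++ [c]).getLast h = c := by simp
            rw [hlast]
            exact hmc

-- A's per-token normalisation at String level is ofList ∘ mwA
theorem mw_strA (t : List Char) :
    PySem.Str.lower (PySem.Str.stripChars (String.ofList t) ",.()[]{}") =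
      String.ofList (mwA t) := by
  simp [PySem.Str.lower, PySem.Str.stripChars, mwA, mwStrip]

-- A's whole String-level pipeline over a token list, including the redundant
-- non-empty pre-filter (len > 1 already rejects empty strips)
theorem mw_pipe (T : List (List Char)) :
    (((T.map String.ofList).filter
          (fun word => PySem.Str.stripChars word ",.()[]{}" ≠ "")).map
        (fun word => PySem.Str.lower (PySem.Str.stripChars word ",.()[]{}"))).filter
      (fun word => !STOP_WORDS.contains word && 1 < PySem.Str.len word)
    = ((T.map mwA).filter mwPb).map String.ofList := by
  induction T with
  | nil => rfl
  | cons t T ih =>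
    by_cases h : PySem.Chars.stripChars t mwStrip = []
    · have h1 : PySem.Str.stripChars (String.ofList t) ",.()[]{}" = "" := by
        have hts : (",.()[]{}" : String).toList = mwStrip := rfl
        unfold PySem.Str.stripChars
        rw [String.toList_ofList, hts, h]
      have h2 : mwPb (mwA t) = false := by
        have : mwA t = [] := by simp [mwA, h, PySem.Chars.lower]
        rw [this]; decide
      simp only [List.map_cons, List.filter_cons, h1, h2, Bool.false_eq_true, if_false,
        ne_eq, not_true_eq_false, decide_false, ih]
    · have h1 : (PySem.Str.stripChars (String.ofList t) ",.()[]{}" ≠ "") := by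
        simp only [PySem.Str.stripChars, String.toList_ofList]
        intro heq
        apply h
        have := congrArg String.toList heq
        simpa using this
      have h2 : (decide (PySem.Str.stripChars (String.ofList t) ",.()[]{}" ≠ "")) = true := by
        simpa using h1
      simp only [List.map_cons, List.filter_cons, h2, if_true, mw_strA, mw_cond]
      by_cases hpb : mwPb (mwA t)
      · simp only [hpb, if_true, List.map_cons, ih]
      · simp only [hpb, Bool.false_eq_true, if_false, ih]

-- A as a char-level pipeline
theorem mwA_eq_pipeline (s : String) :
    meaningful_words_py s =
      ((((PySem.Chars.split₀ s.toList).map mwA).filter mwPb).map String.ofList).take 2 := by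
  unfold meaningful_words_py
  rw [PySem.List.slice_to _ (by norm_num)]
  have hsplit : PySem.Str.split₀ s = (PySem.Chars.split₀ s.toList).map String.ofList := rfl
  rw [hsplit, mw_pipe]
  simp

theorem mw_eq (s : String) : meaningful_words_py s = meaningful_words_py_alt s := by
  rw [mwA_eq_pipeline]
  unfold meaningful_words_py_alt
  rw [mwScan_eq s.toList [] [] [] [] (by simp) mwR_nil]
  rfl

-- ===== VERDICT (by name: the statement is the Claim_ definition above) =====
theorem meaningful_words_py_spec : Claim_equal_meaningful_words_py := by
  intro s _
  exact mw_eq s
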